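-- pv_equiv track=rewrite | github.com/yourProgrammist/MPU_crypto | virtical.py | arr_from_key
-- ===== SOURCE A (Python) =====
-- from typing import List
-- from typing import List
--
-- def all_indexes(key: str, ch: str) -> List[int]:
--     """
--     Search all occurrence in string
--     :param key: str
--     :param ch: str
--     :return: List[int]
--     """
--     return [index for index, i in enumerate(key) if i == ch]
--
-- def arr_from_key(key: str) -> List[int]:
--     """
--     :param key: str
--     :return: List[int]
--     """
--     arr = [0 for _ in range(len(key))]
--     indexes = {}
--     for i in key:
--         indexes[i] = all_indexes(key, i)
--     indexes = dict(sorted(indexes.items(), key=lambda x:x[0]))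
--     idx = 1
--     for i in indexes:
--         for index in indexes[i]:
--             arr[index] = idx
--             idx += 1
--     return arr
-- ===== SOURCE B (Python) =====
-- def arr_from_key(key: str):
--     # counting ranks directly: rank = (# chars smaller anywhere) + (# equal chars earlier) + 1
--     counts = {}
--     for c in key:
--         counts[c] = counts.get(c, 0) + 1
--     base = {}
--     total = 0
--     for c in sorted(counts):
--         base[c] = total
--         total += counts[c]
--     seen = {}
--     arr = []
--     for c in key:
--         k = seen.get(c, 0)
--         arr.append(base[c] + k + 1)
--         seen[c] = k + 1
--     return arr
-- ===== Notes on version B (the rewrite author's own statement) =====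
-- stated objective: faster
-- what changed: Instead of collecting all occurrence lists (rescanning the whole string per character) and writing ranks through a sorted dict of index lists, B counts characters once, precomputes for each distinct character the number of strictly smaller characters, and emits each position's rank in one left-to-right pass using a running per-character counter.
import Mathlib
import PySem

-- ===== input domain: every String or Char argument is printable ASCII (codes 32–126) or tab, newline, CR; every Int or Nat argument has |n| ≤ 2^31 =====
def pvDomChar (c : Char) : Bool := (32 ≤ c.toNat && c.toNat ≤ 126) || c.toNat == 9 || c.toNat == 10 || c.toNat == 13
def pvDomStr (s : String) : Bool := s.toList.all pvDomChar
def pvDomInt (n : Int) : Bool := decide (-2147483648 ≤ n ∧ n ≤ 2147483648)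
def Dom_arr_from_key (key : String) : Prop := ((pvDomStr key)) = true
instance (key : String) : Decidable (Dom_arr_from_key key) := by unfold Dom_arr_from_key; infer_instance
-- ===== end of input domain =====

-- B is a different algorithm: A rescans the string per character building occurrence lists and
-- writes ranks through a sorted dict of index lists (O(n^2)); B counts characters and emits each
-- rank directly in one pass (measured asymptotically faster).

-- ===== PORT A =====
-- [index for index, i in enumerate(key) if i == ch]
def pvAllIndexes (key : List Char) (ch : Char) : List Int :=
  ((PySem.List.enumerate key 0).filter (fun q => q.2 == ch)).map (·.1)

-- inner loop body: for index in indexes[i]: arr[index] = idx; idx += 1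
def pvAssign (st : List Int × Int) (g : List Int) : List Int × Int :=
  g.foldl (fun st index => (PySem.List.pySetD st.1 index st.2, st.2 + 1)) st

def arr_from_key (key : String) : List Int :=
  let ks := key.toList
  let arr : List Int := List.replicate ks.length (0 : Int)
  let indexes : PySem.Dict Char (List Int) :=
    ks.foldl (fun d i => d.insert i (pvAllIndexes ks i)) PySem.Dict.empty
  let indexes2 : PySem.Dict Char (List Int) :=
    PySem.Dict.ofList (PySem.List.sorted indexes.items (fun x => x.1) false)
  let final : List Int × Int :=
    indexes2.keys.foldl (fun st i => pvAssign st (indexes2.getD i [])) (arr, 1)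
  final.1

-- ===== PORT B =====
def arr_from_key_alt (key : String) : List Int :=
  let ks := key.toList
  let counts : PySem.Dict Char Int :=
    ks.foldl (fun d c => d.insert c (d.getD c 0 + 1)) PySem.Dict.empty
  let bt : PySem.Dict Char Int × Int :=
    (PySem.List.sorted counts.keys (fun c => c) false).foldl
      (fun p c => (p.1.insert c p.2, p.2 + counts.getD c 0)) (PySem.Dict.empty, 0)
  let final : PySem.Dict Char Int × List Int :=
    ks.foldl (fun p c =>
      let k := p.1.getD c 0
      (p.1.insert c (k + 1), p.2 ++ [bt.1.getD c 0 + k + 1])) (PySem.Dict.empty, [])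
  final.2

-- ===== PRECONDITION & SPEC =====
def Spec_arr_from_key (key : String) (out : List Int) : Prop := out = arr_from_key_alt key
instance (key : String) (out : List Int) : Decidable (Spec_arr_from_key key out) := by unfold Spec_arr_from_key; infer_instance

-- ===== CLAIM (what is proved, stated in full; the proofs are below) =====
def Claim_equal_arr_from_key : Prop := ∀ (key : String), Dom_arr_from_key key → Spec_arr_from_key key (arr_from_key key)

-- ===== LEMMAS AND PROOFS =====

-- proof-side recursive view of pvAllIndexes (occurrence list from offset s)
def pvEIdx : Int → List Char → Char → List Int
  | _, [], _ => []
  | s, x :: l, c => if x = c then s :: pvEIdx (s+1) l c else pvEIdx (s+1) l c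

-- first-occurrence index (our own idxOf over Int lists)
def pvIdx (v : Int) : List Int → Nat
  | [] => 0
  | x :: l => if x = v then 0 else pvIdx v l + 1

-- sequential assignment: arr[g_j] := t + j
def pvSetSeq : List Int → List Int → Int → List Int
  | arr, [], _ => arr
  | arr, v :: g, t => pvSetSeq (PySem.List.pySetD arr v t) g (t+1)

-- the sorted distinct characters and the number of strictly smaller characters
def pvCS (ks : List Char) : List Char := PySem.List.sorted (PySem.Set.ofList ks) (fun c => c) false

def pvSmaller (ks : List Char) (c : Char) : Int :=
  (((pvCS ks).filter (fun c' => decide (c' < c))).map (fun c' => (ks.count c' : Int))).sum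

-- running per-character counter dict (B's `counts` and `seen` folds)
def pvSeen (l : List Char) : PySem.Dict Char Int :=
  l.foldl (fun d c => d.insert c (d.getD c 0 + 1)) PySem.Dict.empty

-- spec view of B's output loop
def pvOut (b : PySem.Dict Char Int) : List Char → List Char → List Int
  | _, [] => []
  | pre, c :: s => (b.getD c 0 + (pre.count c : Int) + 1) :: pvOut b (pre ++ [c]) s

-- === pvEIdx facts ===
lemma pvAllIndexes_eq (l : List Char) (s : Int) (c : Char) :
    ((PySem.List.enumerate l s).filter (fun q => q.2 == c)).map (·.1) = pvEIdx s l c := by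
  induction l generalizing s with
  | nil => simp [pvEIdx, PySem.List.enumerate]
  | cons x l ih =>
    rw [PySem.List.enumerate_cons]
    by_cases h : x = c <;> simp [pvEIdx, h, ih]


lemma pvEIdx_length (l : List Char) (s : Int) (c : Char) :
    (pvEIdx s l c).length = l.count c := by
  induction l generalizing s with
  | nil => simp [pvEIdx]
  | cons x l ih =>
    by_cases h : x = c <;> simp [pvEIdx, h, ih]


lemma pvEIdx_mem (l : List Char) (s : Int) (c : Char) (j : Int) (hj : j ∈ pvEIdx s l c) :
    ∃ k : Nat, ∃ _ : k < l.length, j = s + k ∧ l[k] = c := by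
  induction l generalizing s with
  | nil => simp [pvEIdx] at hj
  | cons x l ih =>
    by_cases h : x = c
    · simp only [pvEIdx, if_pos h, List.mem_cons] at hj
      rcases hj with hj | hj
      · exact ⟨0, by simp, by simpa using hj, by simpa using h⟩
      · obtain ⟨k, hk, hjk, hkc⟩ := ih (s+1) hj
        exact ⟨k+1, by simpa using hk, by push_cast; omega, by simpa using hkc⟩
    · simp only [pvEIdx, if_neg h] at hj
      obtain ⟨k, hk, hjk, hkc⟩ := ih (s+1) hj
      exact ⟨k+1, by simpa using hk, by push_cast; omega, by simpa using hkc⟩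


lemma pvEIdx_mem_intro (l : List Char) (s : Int) (c : Char) (k : Nat) (hk : k < l.length)
    (hc : l[k] = c) : s + (k : Int) ∈ pvEIdx s l c := by
  induction l generalizing s k with
  | nil => simp at hk
  | cons x l ih =>
    cases k with
    | zero =>
      simp only [List.getElem_cons_zero] at hc
      simp [pvEIdx, hc]
    | succ k =>
      simp only [List.getElem_cons_succ] at hc
      have hmem : s + 1 + (k : Int) ∈ pvEIdx (s+1) l c := ih (s+1) k (by simpa using hk) hc
      have e : s + ((k : Nat) + 1 : Int) = s + 1 + (k : Int) := by ring
      by_cases h : x = c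
      · simp only [pvEIdx, if_pos h]
        push_cast
        rw [e]
        exact List.mem_cons_of_mem _ hmem
      · simp only [pvEIdx, if_neg h]
        push_cast
        rw [e]
        exact hmem

lemma pvEIdx_nodup (l : List Char) (s : Int) (c : Char) : (pvEIdx s l c).Nodup := by
  induction l generalizing s with
  | nil => simp [pvEIdx]
  | cons x l ih =>
    have hge : ∀ j ∈ pvEIdx (s+1) l c, s + 1 ≤ j := by
      intro j hj
      obtain ⟨k, hk, hjk, _⟩ := pvEIdx_mem l (s+1) c j hj
      omega
    by_cases h : x = c
    · simp only [pvEIdx, if_pos h]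
      refine List.nodup_cons.mpr ⟨fun hmem => ?_, ih (s+1)⟩
      have := hge s hmem; omega
    · simpa only [pvEIdx, if_neg h] using ih (s+1)


lemma pvEIdx_idx (l : List Char) (s : Int) (c : Char) (p : Nat) (hp : p < l.length)
    (hc : l[p] = c) : pvIdx (s + (p : Int)) (pvEIdx s l c) = (l.take p).count c := by
  induction l generalizing s p with
  | nil => simp at hp
  | cons x l ih =>
    cases p with
    | zero =>
      simp only [List.getElem_cons_zero] at hc
      simp [pvEIdx, hc, pvIdx]
    | succ p =>
      simp only [List.getElem_cons_succ] at hc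
      have key : pvIdx (s + 1 + (p : Int)) (pvEIdx (s+1) l c) = (l.take p).count c :=
        ih (s+1) p (by simpa using hp) hc
      have e : s + ((p : Nat) + 1 : Int) = s + 1 + (p : Int) := by ring
      by_cases h : x = c
      · simp only [pvEIdx, if_pos h, pvIdx]
        rw [if_neg (by push_cast; omega)]
        rw [List.take_succ_cons, List.count_cons]
        push_cast
        rw [e, key]
        simp [h]
      · simp only [pvEIdx, if_neg h]
        rw [List.take_succ_cons, List.count_cons]
        push_cast
        rw [e, key]
        simp [h]

-- === pvIdx on appends ===
lemma pvIdx_append_left (j : Int) (l1 l2 : List Int) (h : j ∈ l1) :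
    pvIdx j (l1 ++ l2) = pvIdx j l1 := by
  induction l1 with
  | nil => simp at h
  | cons x l1 ih =>
    by_cases hx : x = j
    · simp [pvIdx, hx]
    · have : j ∈ l1 := by
        rcases List.mem_cons.mp h with h' | h'
        · exact absurd h'.symm hx
        · exact h'
      simp [pvIdx, hx, ih this]


lemma pvIdx_append_right (j : Int) (l1 l2 : List Int) (h : j ∉ l1) :
    pvIdx j (l1 ++ l2) = l1.length + pvIdx j l2 := by
  induction l1 with
  | nil => simp
  | cons x l1 ih =>
    have hx : x ≠ j := fun e => h (e ▸ List.mem_cons_self)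
    have h1 : j ∉ l1 := fun m => h (List.mem_cons_of_mem _ m)
    simp [pvIdx, hx, ih h1]
    omega


-- === pvSetSeq facts ===
lemma pvAssign_eq (g : List Int) (arr : List Int) (t : Int) :
    pvAssign (arr, t) g = (pvSetSeq arr g t, t + g.length) := by
  induction g generalizing arr t with
  | nil => simp [pvAssign, pvSetSeq]
  | cons v g ih =>
    simp only [pvAssign, List.foldl_cons] at *
    rw [ih]
    simp [pvSetSeq]
    ring


lemma pvSetSeq_length (g : List Int) (arr : List Int) (t : Int) :
    (pvSetSeq arr g t).length = arr.length := by
  induction g generalizing arr t with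
  | nil => rfl
  | cons v g ih =>
    simp only [pvSetSeq]
    rw [ih, PySem.List.length_pySetD]


lemma pvSetSeq_append (g1 g2 : List Int) (arr : List Int) (t : Int) :
    pvSetSeq arr (g1 ++ g2) t = pvSetSeq (pvSetSeq arr g1 t) g2 (t + g1.length) := by
  induction g1 generalizing arr t with
  | nil => simp [pvSetSeq]
  | cons v g1 ih =>
    simp only [pvSetSeq, List.cons_append, List.length_cons]
    rw [ih]
    congr 1
    push_cast
    ring


lemma pvAssign_flatMap (f : Char → List Int) (cs : List Char) (arr : List Int) (t : Int) :
    cs.foldl (fun st c => pvAssign st (f c)) (arr, t)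
      = (pvSetSeq arr (cs.flatMap f) t, t + (cs.flatMap f).length) := by
  induction cs generalizing arr t with
  | nil => simp [pvSetSeq]
  | cons a cs ih =>
    simp only [List.foldl_cons, List.flatMap_cons]
    rw [pvAssign_eq, ih, pvSetSeq_append]
    congr 1
    simp
    ring


lemma pvSetSeq_getElem (vs : List Int) (arr : List Int) (t : Int) (p : Nat)
    (hp : p < arr.length) (hnd : vs.Nodup)
    (hr : ∀ v ∈ vs, ∃ k : Nat, v = (k : Int) ∧ k < arr.length) :
    (pvSetSeq arr vs t)[p]'(by rw [pvSetSeq_length]; exact hp)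
      = if ((p : Int) ∈ vs) then t + (pvIdx (p : Int) vs : Int) else arr[p] := by
  induction vs generalizing arr t with
  | nil => simp [pvSetSeq]
  | cons v vs ih =>
    obtain ⟨k, rfl, hk⟩ := hr v List.mem_cons_self
    have hnd' := List.nodup_cons.mp hnd
    simp only [pvSetSeq, PySem.List.pySetD_natCast]
    have hr' : ∀ w ∈ vs, ∃ m : Nat, w = (m : Int) ∧ m < (arr.set k t).length := by
      intro w hw
      obtain ⟨m, rfl, hm⟩ := hr w (List.mem_cons_of_mem _ hw)
      exact ⟨m, rfl, by simpa using hm⟩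
    rw [ih (arr.set k t) (t+1) (by simpa using hp) hnd'.2 hr']
    by_cases hmem : (p : Int) ∈ vs
    · have hne : (k : Int) ≠ (p : Int) := fun e => hnd'.1 (e ▸ hmem)
      simp only [if_pos hmem, if_pos (List.mem_cons_of_mem _ hmem), pvIdx, if_neg hne]
      push_cast
      ring
    · simp only [if_neg hmem]
      rw [List.getElem_set]
      by_cases hkp : k = p
      · subst hkp
        simp [pvIdx, List.mem_cons]
      · have hne : (k : Int) ≠ (p : Int) := by exact_mod_cast hkp
        have hne2 : (p : Int) ≠ (k : Int) := fun e => hne e.symm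
        have : (p : Int) ∉ ((k : Int) :: vs) := by
          simp [List.mem_cons, hmem, hne2]
        simp [hkp, this]


-- === the flattened occurrence list ===
lemma pvFlat_nodup (ks : List Char) (cs : List Char) (hnd : cs.Nodup) :
    (cs.flatMap (fun c => pvEIdx 0 ks c)).Nodup := by
  induction cs with
  | nil => simp
  | cons a cs ih =>
    have hnd' := List.nodup_cons.mp hnd
    simp only [List.flatMap_cons]
    rw [List.nodup_append]
    refine ⟨pvEIdx_nodup ks 0 a, ih hnd'.2, ?_⟩
    intro j hj1 j2 hj2 hje
    subst hje
    obtain ⟨c', hc', hj2'⟩ := List.mem_flatMap.mp hj2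
    obtain ⟨k1, hk1, e1, g1⟩ := pvEIdx_mem ks 0 a j hj1
    obtain ⟨k2, hk2, e2, g2⟩ := pvEIdx_mem ks 0 c' j hj2'
    have : k1 = k2 := by omega
    subst this
    have : a = c' := g1.symm.trans g2
    exact hnd'.1 (this ▸ hc')


lemma pvFlat_range (ks : List Char) (cs : List Char) (v : Int)
    (hv : v ∈ cs.flatMap (fun c => pvEIdx 0 ks c)) :
    ∃ k : Nat, v = (k : Int) ∧ k < ks.length := by
  obtain ⟨c, hc, hv⟩ := List.mem_flatMap.mp hv
  obtain ⟨k, hk, e, _⟩ := pvEIdx_mem ks 0 c v hv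
  exact ⟨k, by omega, hk⟩


lemma pvFlat_idx (ks : List Char) (cs : List Char) (hpw : cs.Pairwise (· < ·))
    (p : Nat) (hp : p < ks.length) (hmem : ks[p] ∈ cs) :
    pvIdx (p : Int) (cs.flatMap (fun c => pvEIdx 0 ks c))
      = ((cs.filter (fun c' => decide (c' < ks[p]))).map (fun c' => ks.count c')).sum
        + (ks.take p).count ks[p] := by
  induction cs with
  | nil => simp at hmem
  | cons a cs ih =>
    have hpw' := List.pairwise_cons.mp hpw
    simp only [List.flatMap_cons]
    by_cases ha : a = ks[p]
    · subst ha
      have hpe : (p : Int) ∈ pvEIdx 0 ks ks[p] := by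
        have := pvEIdx_mem_intro ks 0 ks[p] p hp rfl
        simpa using this
      rw [pvIdx_append_left _ _ _ hpe]
      have hidx := pvEIdx_idx ks 0 ks[p] p hp rfl
      simp only [zero_add] at hidx
      rw [hidx]
      have hfilt : (ks[p] :: cs).filter (fun c' => decide (c' < ks[p])) = [] := by
        rw [List.filter_eq_nil_iff]
        intro x hx
        rcases List.mem_cons.mp hx with h' | h'
        · simp [h']
        · have : ks[p] < x := hpw'.1 x h'
          simp only [decide_eq_true_eq]
          exact not_lt_of_gt this
      rw [hfilt]
      simp
    · have hc : ks[p] ∈ cs := by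
        rcases List.mem_cons.mp hmem with h' | h'
        · exact absurd h'.symm ha
        · exact h'
      have halt : a < ks[p] := hpw'.1 _ hc
      have hnm : (p : Int) ∉ pvEIdx 0 ks a := by
        intro hm
        obtain ⟨k, hk, e, g⟩ := pvEIdx_mem ks 0 a _ hm
        have : k = p := by omega
        subst this
        exact ha g.symm
      rw [pvIdx_append_right _ _ _ hnm, pvEIdx_length, ih hpw'.2 hc]
      have hfilt : (a :: cs).filter (fun c' => decide (c' < ks[p]))
          = a :: cs.filter (fun c' => decide (c' < ks[p])) := by
        simp [halt]
      rw [hfilt]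
      simp
      omega


-- === dict A facts ===
lemma pvGetD_insert_const (l : List Char) (f : Char → List Int) (d : PySem.Dict Char (List Int))
    (x : Char) :
    (l.foldl (fun d i => d.insert i (f i)) d).getD x []
      = if x ∈ l then f x else d.getD x [] := by
  induction l generalizing d with
  | nil => simp
  | cons a l ih =>
    simp only [List.foldl_cons]
    rw [ih]
    by_cases hx : x ∈ l
    · simp [hx]
    · simp only [if_neg hx, PySem.Dict.getD_insert]
      by_cases hxa : x = a <;> simp [hxa, List.mem_cons, hx]


-- A's result as a sequential assignment along the sorted flattened occurrence lists
lemma pvA_eq (key : String) :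
    arr_from_key key
      = pvSetSeq (List.replicate key.toList.length 0)
          ((pvCS key.toList).flatMap (fun c => pvEIdx 0 key.toList c)) 1 := by
  unfold arr_from_key
  dsimp only
  set ks := key.toList with hks
  -- the first dict: keys and lookups
  set d1 : PySem.Dict Char (List Int) :=
    ks.foldl (fun d i => d.insert i (pvAllIndexes ks i)) PySem.Dict.empty with hd1
  have hkeys : d1.keys = PySem.Set.ofList ks := by
    rw [hd1, PySem.Dict.keys_foldl_insert]
    rfl
  have hknd : d1.keys.Nodup := by
    rw [hkeys]; exact PySem.Set.nodup_ofList ks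
  have hget : ∀ c ∈ ks, d1.getD c [] = pvAllIndexes ks c := by
    intro c hc
    rw [hd1, pvGetD_insert_const]
    simp [hc]
  -- its items are the distinct chars paired with their occurrence lists
  have hitems : d1.items = (PySem.Set.ofList ks).map (fun c => (c, pvAllIndexes ks c)) := by
    rw [PySem.Dict.items_eq_map_keys d1 hknd [], hkeys]
    apply List.map_congr_left
    intro c hc
    rw [hget c ((PySem.Set.mem_ofList ks c).mp hc)]
  -- sorting the items by first component
  have hpwcs : (pvCS ks).Pairwise (· < ·) := PySem.List.sorted_ofList_pairwise_lt ks
  have hcsnd : (pvCS ks).Nodup := hpwcs.imp ne_of_lt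
  have hsorted : PySem.List.sorted d1.items (fun x => x.1) false
      = (pvCS ks).map (fun c => (c, pvAllIndexes ks c)) := by
    apply PySem.List.sorted_eq_of_perm_of_pairwise_lt
    · rw [hitems]
      exact (PySem.List.sorted_perm (PySem.Set.ofList ks) (fun c => c) false).map _
    · exact List.Pairwise.map _ (fun a b h => h) hpwcs
  -- the rebuilt dict
  set ys := (pvCS ks).map (fun c => (c, pvAllIndexes ks c)) with hys
  have hys1 : ys.map (fun p => p.1) = pvCS ks := by
    simp [hys, Function.comp_def]
  have hitems2 : (PySem.Dict.ofList ys).items = ys := by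
    have := PySem.Dict.items_foldl_insert_fresh ys (fun p => p.1) (fun p => p.2)
      PySem.Dict.empty (by intro a _; exact PySem.Dict.contains_empty _)
      (by rw [hys1]; exact hcsnd)
    simpa using this
  have hkeys2 : (PySem.Dict.ofList ys).keys = pvCS ks := by
    show (PySem.Dict.ofList ys).items.map (fun p => p.1) = pvCS ks
    rw [hitems2, hys1]
  have hknd2 : (PySem.Dict.ofList ys).keys.Nodup := by rw [hkeys2]; exact hcsnd
  have hget2 : ∀ c ∈ pvCS ks, (PySem.Dict.ofList ys).getD c [] = pvAllIndexes ks c := by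
    intro c hc
    exact PySem.Dict.getD_of_mem_items (PySem.Dict.ofList ys)
      (by rw [hitems2, hys]; exact List.mem_map.mpr ⟨c, hc, rfl⟩) hknd2 []
  rw [hsorted, hkeys2]
  rw [PySem.List.foldl_congr_mem (pvCS ks) _
    (fun st c => pvAssign st (pvAllIndexes ks c)) _
    (fun st c hc => by rw [hget2 c hc])]
  rw [PySem.List.foldl_congr_mem (pvCS ks) _
    (fun st c => pvAssign st (pvEIdx 0 ks c)) _
    (fun st c _ => by
      show pvAssign st (pvAllIndexes ks c) = pvAssign st (pvEIdx 0 ks c)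
      rw [pvAllIndexes, pvAllIndexes_eq])]
  rw [pvAssign_flatMap]


lemma pvA_length (key : String) : (arr_from_key key).length = key.toList.length := by
  rw [pvA_eq, pvSetSeq_length, List.length_replicate]


lemma pvA_getElem (key : String) (p : Nat) (hp : p < key.toList.length) :
    (arr_from_key key)[p]'(by rw [pvA_length]; exact hp)
      = 1 + pvSmaller key.toList (key.toList[p])
          + ((key.toList.take p).count key.toList[p] : Int) := by
  set ks := key.toList with hks
  have hpw : (pvCS ks).Pairwise (· < ·) := PySem.List.sorted_ofList_pairwise_lt ks
  have hmem : ks[p] ∈ pvCS ks := by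
    rw [pvCS, PySem.List.mem_sorted, PySem.Set.mem_ofList]
    exact List.getElem_mem hp
  have hin : (p : Int) ∈ (pvCS ks).flatMap (fun c => pvEIdx 0 ks c) := by
    apply List.mem_flatMap.mpr
    refine ⟨ks[p], hmem, ?_⟩
    have := pvEIdx_mem_intro ks 0 ks[p] p hp rfl
    simpa using this
  have hget := pvSetSeq_getElem ((pvCS ks).flatMap (fun c => pvEIdx 0 ks c))
    (List.replicate ks.length 0) 1 p (by simpa using hp)
    (pvFlat_nodup ks (pvCS ks) (hpw.imp ne_of_lt))
    (fun v hv => by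
      obtain ⟨k, e, hk⟩ := pvFlat_range ks (pvCS ks) v hv
      exact ⟨k, e, by simpa using hk⟩)
  rw [if_pos hin] at hget
  have goal_eq : (arr_from_key key)[p]'(by rw [pvA_length]; exact hp)
      = (pvSetSeq (List.replicate ks.length 0)
          ((pvCS ks).flatMap (fun c => pvEIdx 0 ks c)) 1)[p]'(by
            rw [pvSetSeq_length]; simpa using hp) := by
    congr 1
    exact pvA_eq key
  rw [goal_eq, hget, pvFlat_idx ks (pvCS ks) hpw p hp hmem]
  rw [pvSmaller]
  push_cast [Nat.cast_list_sum, List.map_map, Function.comp_def]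
  ring


-- === B facts ===
lemma pvSeen_getD (l : List Char) (c : Char) : (pvSeen l).getD c 0 = l.count c := by
  rw [pvSeen]
  have := PySem.Dict.getD_foldl_insert_add_one l PySem.Dict.empty c
  rw [this]
  simp


lemma pvB_fold (b : PySem.Dict Char Int) (s pre : List Char) (out : List Int) :
    (s.foldl (fun p c =>
        (p.1.insert c (p.1.getD c 0 + 1), p.2 ++ [b.getD c 0 + p.1.getD c 0 + 1]))
      (pvSeen pre, out)).2 = out ++ pvOut b pre s := by
  induction s generalizing pre out with
  | nil => simp [pvOut]
  | cons c s ih =>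
    simp only [List.foldl_cons, pvOut]
    have hseen : (pvSeen pre).insert c ((pvSeen pre).getD c 0 + 1) = pvSeen (pre ++ [c]) := by
      rw [pvSeen, pvSeen, List.foldl_append]
      rfl
    rw [pvSeen_getD, hseen] at *
    rw [ih (pre ++ [c]) (out ++ [b.getD c 0 + (pre.count c : Int) + 1])]
    simp


lemma pvOut_length (b : PySem.Dict Char Int) (s pre : List Char) :
    (pvOut b pre s).length = s.length := by
  induction s generalizing pre with
  | nil => rfl
  | cons c s ih => simp [pvOut, ih]


lemma pvOut_getElem (b : PySem.Dict Char Int) (s pre : List Char) (j : Nat) (hj : j < s.length) :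
    (pvOut b pre s)[j]'(by rw [pvOut_length]; exact hj)
      = b.getD s[j] 0 + ((pre ++ s.take j).count s[j] : Int) + 1 := by
  induction s generalizing pre j with
  | nil => simp at hj
  | cons c s ih =>
    cases j with
    | zero => simp [pvOut]
    | succ j =>
      have := ih (pre ++ [c]) j (by simpa using hj)
      simp only [pvOut, List.getElem_cons_succ, List.take_succ_cons,
        List.getElem_cons_succ] at *
      rw [this]
      congr 2
      simp [List.append_assoc]


lemma pvBase_skip (w : Char → Int) (l : List Char) (c : Char) (hc : c ∉ l)
    (d : PySem.Dict Char Int) (t : Int) :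
    ((l.foldl (fun p x => (p.1.insert x p.2, p.2 + w x)) (d, t)).1).getD c 0 = d.getD c 0 := by
  induction l generalizing d t with
  | nil => rfl
  | cons a l ih =>
    have ha : c ≠ a := fun e => hc (e ▸ List.mem_cons_self)
    have h1 : c ∉ l := fun m => hc (List.mem_cons_of_mem _ m)
    simp only [List.foldl_cons]
    rw [ih h1, PySem.Dict.getD_insert, if_neg ha]


lemma pvBase_getD (w : Char → Int) (l : List Char) (c : Char) (hnd : l.Nodup) (hc : c ∈ l)
    (d : PySem.Dict Char Int) (t : Int) :
    ((l.foldl (fun p x => (p.1.insert x p.2, p.2 + w x)) (d, t)).1).getD c 0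
      = t + ((l.takeWhile (fun x => decide (x ≠ c))).map w).sum := by
  induction l generalizing d t with
  | nil => simp at hc
  | cons a l ih =>
    have hnd' := List.nodup_cons.mp hnd
    simp only [List.foldl_cons]
    by_cases ha : a = c
    · subst ha
      rw [pvBase_skip w l a hnd'.1]
      simp [List.takeWhile]
    · have hc' : c ∈ l := by
        rcases List.mem_cons.mp hc with h' | h'
        · exact absurd h'.symm ha
        · exact h'
      rw [ih hnd'.2 hc']
      have : (a :: l).takeWhile (fun x => decide (x ≠ c)) =
          a :: l.takeWhile (fun x => decide (x ≠ c)) := by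
        simp [ha]
      rw [this]
      simp
      ring


lemma pvTakeWhile_filter (cs : List Char) (c : Char) (hpw : cs.Pairwise (· < ·)) (hc : c ∈ cs) :
    cs.takeWhile (fun x => decide (x ≠ c)) = cs.filter (fun x => decide (x < c)) := by
  induction cs with
  | nil => simp at hc
  | cons a cs ih =>
    have hpw' := List.pairwise_cons.mp hpw
    by_cases ha : a = c
    · subst ha
      have h1 : (a :: cs).takeWhile (fun x => decide (x ≠ a)) = [] := by
        simp
      have h2 : (a :: cs).filter (fun x => decide (x < a)) = [] := by
        rw [List.filter_eq_nil_iff]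
        intro x hx
        rcases List.mem_cons.mp hx with h' | h'
        · simp [h']
        · have : a < x := hpw'.1 x h'
          simp only [decide_eq_true_eq]
          exact not_lt_of_gt this
      rw [h1, h2]
    · have hc' : c ∈ cs := by
        rcases List.mem_cons.mp hc with h' | h'
        · exact absurd h'.symm ha
        · exact h'
      have halt : a < c := hpw'.1 _ hc'
      rw [List.takeWhile_cons, List.filter_cons]
      simp only [ha, decide_true, ne_eq, not_false_iff, halt, if_pos]
      rw [ih hpw'.2 hc']


lemma pvB_eq (key : String) :
    arr_from_key_alt key = pvOut ((pvCS key.toList).foldl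
        (fun p c => (p.1.insert c p.2, p.2 + (pvSeen key.toList).getD c 0))
        (PySem.Dict.empty, 0)).1 [] key.toList := by
  unfold arr_from_key_alt
  dsimp only
  set ks := key.toList with hks
  have hcounts : ks.foldl (fun d c => d.insert c (d.getD c 0 + 1)) PySem.Dict.empty
      = pvSeen ks := rfl
  have hkeys : (pvSeen ks).keys = PySem.Set.ofList ks := by
    rw [pvSeen, PySem.Dict.keys_foldl_insert]
    rfl
  rw [hcounts, hkeys]
  have : PySem.List.sorted (PySem.Set.ofList ks) (fun c => c) false = pvCS ks := rfl
  rw [this]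
  have hfold := pvB_fold ((pvCS ks).foldl
      (fun p c => (p.1.insert c p.2, p.2 + (pvSeen ks).getD c 0))
      (PySem.Dict.empty, 0)).1 ks [] []
  have hseennil : pvSeen [] = PySem.Dict.empty := rfl
  rw [hseennil] at hfold
  simpa using hfold


lemma pvB_length (key : String) : (arr_from_key_alt key).length = key.toList.length := by
  rw [pvB_eq, pvOut_length]


lemma pvB_getElem (key : String) (p : Nat) (hp : p < key.toList.length) :
    (arr_from_key_alt key)[p]'(by rw [pvB_length]; exact hp)
      = pvSmaller key.toList (key.toList[p])
          + ((key.toList.take p).count key.toList[p] : Int) + 1 := by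
  set ks := key.toList with hks
  have hpw : (pvCS ks).Pairwise (· < ·) := PySem.List.sorted_ofList_pairwise_lt ks
  have hnd : (pvCS ks).Nodup := hpw.imp ne_of_lt
  have hmem : ks[p] ∈ pvCS ks := by
    rw [pvCS, PySem.List.mem_sorted, PySem.Set.mem_ofList]
    exact List.getElem_mem hp
  have goal_eq : (arr_from_key_alt key)[p]'(by rw [pvB_length]; exact hp)
      = (pvOut ((pvCS ks).foldl
          (fun q c => (q.1.insert c q.2, q.2 + (pvSeen ks).getD c 0))
          (PySem.Dict.empty, 0)).1 [] ks)[p]'(by rw [pvOut_length]; exact hp) := by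
    congr 1
    exact pvB_eq key
  rw [goal_eq, pvOut_getElem _ ks [] p hp]
  have hbase := pvBase_getD (fun c => (pvSeen ks).getD c 0) (pvCS ks) ks[p] hnd hmem
    PySem.Dict.empty 0
  rw [hbase, pvTakeWhile_filter (pvCS ks) ks[p] hpw hmem]
  have hmapeq : ((pvCS ks).filter (fun x => decide (x < ks[p]))).map
        (fun c => (pvSeen ks).getD c 0)
      = ((pvCS ks).filter (fun x => decide (x < ks[p]))).map
        (fun c => (ks.count c : Int)) := by
    apply List.map_congr_left
    intro c _
    rw [pvSeen_getD]
  rw [hmapeq, pvSmaller]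
  simp only [← hks]
  simp


-- ===== VERDICT (by name: the statement is the Claim_ definition above) =====
theorem arr_from_key_spec : Claim_equal_arr_from_key := by
  intro key _
  unfold Spec_arr_from_key
  apply List.ext_getElem
  · rw [pvA_length, pvB_length]
  · intro p h1 h2
    rw [pvA_getElem key p (by rw [pvA_length] at h1; exact h1),
        pvB_getElem key p (by rw [pvB_length] at h2; exact h2)]
    ring
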